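-- pv_equiv track=rewrite | github.com/iamnian/Quantum-Harmonix | quantum_tuner.py | analyze_harmony
-- ===== SOURCE A (Python) =====
-- intervals = {
--     0: {"name": "Unison", "tension": 0, "type": "consonant", "weight": 0.8},
--     1: {"name": "m2", "tension": 4, "type": "dissonant", "weight": 0.6},
--     2: {"name": "M2", "tension": 3, "type": "dissonant", "weight": 0.7},
--     3: {"name": "m3", "tension": 1, "type": "consonant", "weight": 0.9},
--     4: {"name": "M3", "tension": 1, "type": "consonant", "weight": 0.9},
--     5: {"name": "P4", "tension": 2, "type": "consonant", "weight": 0.8},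
--     6: {"name": "TT", "tension": 5, "type": "dissonant", "weight": 0.5},
--     7: {"name": "P5", "tension": 0, "type": "consonant", "weight": 1.0},
--     8: {"name": "m6", "tension": 2, "type": "consonant", "weight": 0.7},
--     9: {"name": "M6", "tension": 2, "type": "consonant", "weight": 0.7},
--     10: {"name": "m7", "tension": 3, "type": "dissonant", "weight": 0.6},
--     11: {"name": "M7", "tension": 4, "type": "dissonant", "weight": 0.5},
--     12: {"name": "P8", "tension": 0, "type": "consonant", "weight": 0.8},
--     # Extended intervals
--     13: {"name": "m9", "tension": 4, "type": "dissonant", "weight": 0.4},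
--     14: {"name": "M9", "tension": 3, "type": "dissonant", "weight": 0.5},
--     15: {"name": "m10", "tension": 2, "type": "consonant", "weight": 0.6},
--     16: {"name": "M10", "tension": 2, "type": "consonant", "weight": 0.6},
--     17: {"name": "P11", "tension": 1, "type": "consonant", "weight": 0.7},
--     19: {"name": "P12", "tension": 0, "type": "consonant", "weight": 0.7}
-- }
--
-- def analyze_harmony(intervals_list):
--     """Classify tuning's harmonic properties"""
--     interval_types = [intervals[ivl]["type"] for ivl in intervals_list]
--     consonant = interval_types.count("consonant")
--     dissonant = interval_types.count("dissonant")
--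
--     if consonant > dissonant + 2:
--         return "Consonant"
--     elif dissonant > consonant + 2:
--         return "Dissonant"
--     else:
--         return "Mixed"
-- ===== SOURCE B (Python) =====
-- intervals = {
--     0: {"name": "Unison", "tension": 0, "type": "consonant", "weight": 0.8},
--     1: {"name": "m2", "tension": 4, "type": "dissonant", "weight": 0.6},
--     2: {"name": "M2", "tension": 3, "type": "dissonant", "weight": 0.7},
--     3: {"name": "m3", "tension": 1, "type": "consonant", "weight": 0.9},
--     4: {"name": "M3", "tension": 1, "type": "consonant", "weight": 0.9},
--     5: {"name": "P4", "tension": 2, "type": "consonant", "weight": 0.8},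
--     6: {"name": "TT", "tension": 5, "type": "dissonant", "weight": 0.5},
--     7: {"name": "P5", "tension": 0, "type": "consonant", "weight": 1.0},
--     8: {"name": "m6", "tension": 2, "type": "consonant", "weight": 0.7},
--     9: {"name": "M6", "tension": 2, "type": "consonant", "weight": 0.7},
--     10: {"name": "m7", "tension": 3, "type": "dissonant", "weight": 0.6},
--     11: {"name": "M7", "tension": 4, "type": "dissonant", "weight": 0.5},
--     12: {"name": "P8", "tension": 0, "type": "consonant", "weight": 0.8},
--     13: {"name": "m9", "tension": 4, "type": "dissonant", "weight": 0.4},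
--     14: {"name": "M9", "tension": 3, "type": "dissonant", "weight": 0.5},
--     15: {"name": "m10", "tension": 2, "type": "consonant", "weight": 0.6},
--     16: {"name": "M10", "tension": 2, "type": "consonant", "weight": 0.6},
--     17: {"name": "P11", "tension": 1, "type": "consonant", "weight": 0.7},
--     19: {"name": "P12", "tension": 0, "type": "consonant", "weight": 0.7}
-- }
--
-- def analyze_harmony(intervals_list):
--     """Classify tuning's harmonic properties (single signed accumulator)."""
--     score = 0
--     for ivl in intervals_list:
--         if intervals[ivl]["type"] == "consonant":
--             score += 1
--         else:
--             score -= 1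
--     if score > 2:
--         return "Consonant"
--     elif score < -2:
--         return "Dissonant"
--     else:
--         return "Mixed"
-- ===== Notes on version B (the rewrite author's own statement) =====
-- stated objective: simpler
-- what changed: Replaces the materialised type list plus two .count() passes with one loop maintaining a single signed score (+1 consonant, -1 dissonant) compared against ±2.
import Mathlib
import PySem

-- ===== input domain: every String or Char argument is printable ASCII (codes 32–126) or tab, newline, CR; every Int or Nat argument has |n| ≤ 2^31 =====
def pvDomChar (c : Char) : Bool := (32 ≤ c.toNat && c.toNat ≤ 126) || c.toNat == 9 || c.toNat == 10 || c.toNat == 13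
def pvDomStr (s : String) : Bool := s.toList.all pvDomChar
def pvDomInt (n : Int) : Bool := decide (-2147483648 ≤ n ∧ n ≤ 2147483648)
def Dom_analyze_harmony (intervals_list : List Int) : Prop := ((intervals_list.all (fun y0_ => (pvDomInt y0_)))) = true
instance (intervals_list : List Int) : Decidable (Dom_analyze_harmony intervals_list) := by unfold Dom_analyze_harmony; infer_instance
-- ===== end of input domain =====

-- B replaces the type list + two .count() passes by one loop over a single signed score (simpler); only the "type" field of the module dict is ever read, so the ports carry exactly that projection.

-- ===== PORT A =====
-- the module-level `intervals` dict, restricted to its "type" field (the only field analyze_harmony reads)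
def pvIntervalType : PySem.Dict Int String := PySem.Dict.ofList
  [(0, "consonant"), (1, "dissonant"), (2, "dissonant"), (3, "consonant"), (4, "consonant"),
   (5, "consonant"), (6, "dissonant"), (7, "consonant"), (8, "consonant"), (9, "consonant"),
   (10, "dissonant"), (11, "dissonant"), (12, "consonant"), (13, "dissonant"), (14, "dissonant"),
   (15, "consonant"), (16, "consonant"), (17, "consonant"), (19, "consonant")]

def analyze_harmony (intervals_list : List Int) : String :=
  -- intervals[ivl] would raise KeyError off the key set; Pre_ excludes that, so getD's default is never read
  let interval_types := intervals_list.map (fun ivl => PySem.Dict.getD pvIntervalType ivl "")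
  let consonant := PySem.List.count interval_types "consonant"
  let dissonant := PySem.List.count interval_types "dissonant"
  if consonant > dissonant + 2 then "Consonant"
  else if dissonant > consonant + 2 then "Dissonant"
  else "Mixed"

-- ===== PORT B =====
def analyze_harmony_alt (intervals_list : List Int) : String :=
  let score : Int := intervals_list.foldl
    (fun score ivl => if PySem.Dict.getD pvIntervalType ivl "" == "consonant" then score + 1 else score - 1) 0
  if score > 2 then "Consonant"
  else if score < -2 then "Dissonant"
  else "Mixed"

-- ===== PRECONDITION & SPEC =====
-- Pre_ excludes exactly the inputs containing an interval outside the dict's key set, where A raises KeyError (B raises there too).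
def Pre_analyze_harmony (intervals_list : List Int) : Prop :=
  (intervals_list.all (fun ivl => [0, 1, 2, 3, 4, 5, 6, 7, 8, 9, 10, 11, 12, 13, 14, 15, 16, 17, 19].contains ivl)) = true
instance (intervals_list : List Int) : Decidable (Pre_analyze_harmony intervals_list) := by unfold Pre_analyze_harmony; infer_instance
def pvWitness_analyze_harmony : List Int := [0, 7, 6, 12, 19]
def Spec_analyze_harmony (intervals_list : List Int) (out : String) : Prop := out = analyze_harmony_alt intervals_list
instance (intervals_list : List Int) (out : String) : Decidable (Spec_analyze_harmony intervals_list out) := by unfold Spec_analyze_harmony; infer_instance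

-- ===== CLAIM (what is proved, stated in full; the proofs are below) =====
def Claim_equal_analyze_harmony : Prop := ∀ (intervals_list : List Int), Dom_analyze_harmony intervals_list → Pre_analyze_harmony intervals_list → Spec_analyze_harmony intervals_list (analyze_harmony intervals_list)

-- ===== LEMMAS AND PROOFS =====

-- every key in the dict maps to "consonant" or "dissonant"
theorem pvType_cases (ivl : Int)
    (h : [0, 1, 2, 3, 4, 5, 6, 7, 8, 9, 10, 11, 12, 13, 14, 15, 16, 17, 19].contains ivl = true) :
    PySem.Dict.getD pvIntervalType ivl "" = "consonant" ∨
    PySem.Dict.getD pvIntervalType ivl "" = "dissonant" := by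
  simp [List.contains_eq_mem] at h
  rcases h with h|h|h|h|h|h|h|h|h|h|h|h|h|h|h|h|h|h|h <;> subst h <;> decide

-- B's running score equals (#consonant − #dissonant) over A's type list
theorem pvScore_eq (l : List Int)
    (h : ∀ ivl ∈ l, [0, 1, 2, 3, 4, 5, 6, 7, 8, 9, 10, 11, 12, 13, 14, 15, 16, 17, 19].contains ivl = true)
    (s : Int) :
    l.foldl (fun score ivl => if PySem.Dict.getD pvIntervalType ivl "" == "consonant" then score + 1 else score - 1) s
      = s + (PySem.List.count (l.map (fun ivl => PySem.Dict.getD pvIntervalType ivl "")) "consonant" : Int)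
          - (PySem.List.count (l.map (fun ivl => PySem.Dict.getD pvIntervalType ivl "")) "dissonant" : Int) := by
  induction l generalizing s with
  | nil => simp [PySem.List.count]
  | cons x xs ih =>
    have hx := pvType_cases x (h x (List.mem_cons_self ..))
    have hxs : ∀ ivl ∈ xs, [0, 1, 2, 3, 4, 5, 6, 7, 8, 9, 10, 11, 12, 13, 14, 15, 16, 17, 19].contains ivl = true :=
      fun ivl hi => h ivl (List.mem_cons_of_mem _ hi)
    rcases hx with hx | hx <;>
      · rw [List.foldl_cons, ih hxs]
        simp [PySem.List.count, hx]
        ring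

-- ===== VERDICT (by name: the statement is the Claim_ definition above) =====
theorem analyze_harmony_spec : Claim_equal_analyze_harmony := by
  intro l _ hpre
  unfold Spec_analyze_harmony analyze_harmony analyze_harmony_alt
  have h : ∀ ivl ∈ l, [0, 1, 2, 3, 4, 5, 6, 7, 8, 9, 10, 11, 12, 13, 14, 15, 16, 17, 19].contains ivl = true := by
    unfold Pre_analyze_harmony at hpre
    simpa [List.all_eq_true] using hpre
  simp only [pvScore_eq l h 0, zero_add]
  set c := PySem.List.count (l.map (fun ivl => PySem.Dict.getD pvIntervalType ivl "")) "consonant" with hc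
  set d := PySem.List.count (l.map (fun ivl => PySem.Dict.getD pvIntervalType ivl "")) "dissonant" with hd
  by_cases h1 : c > d + 2 <;> by_cases h2 : d > c + 2 <;>
    simp [h1, h2] <;> split_ifs <;> first | rfl | omega
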